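-- pv_equiv track=rewrite | github.com/BatuhanAslan35/CMP-242 | iterators-generators.py | findDistYield
-- ===== SOURCE A (Python) =====
-- def findDistYield(string,char):
--     delta = 0
--     for c in string:
--         if c ==char:
--             yield delta
--             delta = 0
--         else :
--             delta += 1
-- ===== SOURCE B (Python) =====
-- def findDistYield(string, char):
--     positions = [i for i, c in enumerate(string) if c == char]
--     if positions:
--         yield positions[0]
--         for prev, cur in zip(positions, positions[1:]):
--             yield cur - prev - 1
-- ===== Notes on version B (the rewrite author's own statement) =====
-- stated objective: alternative
-- what changed: Replaces the running-delta counter that is reset at every match by an index-table pass: first gather all match positions with enumerate, then emit the first position and the consecutive differences minus one.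
import Mathlib
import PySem

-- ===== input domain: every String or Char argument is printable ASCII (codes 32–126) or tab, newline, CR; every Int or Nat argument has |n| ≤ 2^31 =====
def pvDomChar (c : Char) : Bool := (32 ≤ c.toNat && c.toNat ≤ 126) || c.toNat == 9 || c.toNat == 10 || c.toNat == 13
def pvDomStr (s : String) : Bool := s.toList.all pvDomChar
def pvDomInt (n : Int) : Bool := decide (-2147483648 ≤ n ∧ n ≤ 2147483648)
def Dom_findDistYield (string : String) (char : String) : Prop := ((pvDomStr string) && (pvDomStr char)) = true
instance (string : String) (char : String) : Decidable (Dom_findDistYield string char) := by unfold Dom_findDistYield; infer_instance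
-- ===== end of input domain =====

-- B replaces A's running-delta counter by a two-phase pass (gather match positions, then difference them); alternative decomposition, same cost.

-- ===== PORT A =====
-- running counter, reset at each match; yields are collected in order
def findDistYield (string : String) (char : String) : List Int :=
  (string.toList.foldl
    (fun (st : Int × List Int) c =>
      if String.ofList [c] = char then (0, st.2 ++ [st.1]) else (st.1 + 1, st.2))
    ((0 : Int), ([] : List Int))).2

-- ===== PORT B =====
-- gather positions of matches (enumerate + filter), then first position and consecutive differences minus one
def findDistYield_alt (string : String) (char : String) : List Int :=
  let positions : List Int :=
    (PySem.List.enumerate string.toList 0).filterMap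
      (fun ic => if String.ofList [ic.2] = char then some ic.1 else none)
  match positions with
  | [] => []
  | p :: rest => p :: List.zipWith (fun prev cur => cur - prev - 1) (p :: rest) rest

-- ===== PRECONDITION & SPEC =====
def Spec_findDistYield (string : String) (char : String) (out : List Int) : Prop := out = findDistYield_alt string char
instance (string : String) (char : String) (out : List Int) : Decidable (Spec_findDistYield string char out) := by unfold Spec_findDistYield; infer_instance

-- ===== CLAIM (what is proved, stated in full; the proofs are below) =====
def Claim_equal_findDistYield : Prop := ∀ (string : String) (char : String), Dom_findDistYield string char → Spec_findDistYield string char (findDistYield string char)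

-- ===== LEMMAS AND PROOFS =====

-- A's loop as a direct recursion on the character list
def pvRunA (char : String) (l : List Char) (d : Int) : List Int :=
  match l with
  | [] => []
  | c :: cs => if String.ofList [c] = char then d :: pvRunA char cs 0 else pvRunA char cs (d + 1)

-- match positions, 0-based, as a direct recursion
def pvPos (char : String) (l : List Char) : List Int :=
  match l with
  | [] => []
  | c :: cs =>
    if String.ofList [c] = char then 0 :: (pvPos char cs).map (· + 1)
    else (pvPos char cs).map (· + 1)

-- B's second phase on an arbitrary position list, with the head shifted by d
def pvBOf (d : Int) (ps : List Int) : List Int :=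
  match ps with
  | [] => []
  | p :: rest => (d + p) :: List.zipWith (fun prev cur => cur - prev - 1) (p :: rest) rest

theorem pvFoldA (char : String) (l : List Char) (d : Int) (acc : List Int) :
    (l.foldl
      (fun (st : Int × List Int) c =>
        if String.ofList [c] = char then (0, st.2 ++ [st.1]) else (st.1 + 1, st.2))
      (d, acc)).2 = acc ++ pvRunA char l d := by
  induction l generalizing d acc with
  | nil => simp [pvRunA]
  | cons c cs ih =>
    by_cases h : String.ofList [c] = char <;>
      simp [pvRunA, h, ih]

theorem pvZipShift (xs ys : List Int) :
    List.zipWith (fun prev cur => cur - prev - 1) (xs.map (· + 1)) (ys.map (· + 1)) =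
      List.zipWith (fun prev cur => cur - prev - 1) xs ys := by
  induction xs generalizing ys with
  | nil => simp
  | cons x xs ih =>
    cases ys with
    | nil => simp
    | cons y ys =>
      simp only [List.map_cons, List.zipWith_cons_cons, ih]
      congr 1
      ring

theorem pvMapShift (char : String) (s : Int) (cs : List Char) :
    (pvPos char cs).map (fun x => x + (s + 1)) = ((pvPos char cs).map (· + 1)).map (· + s) := by
  simp only [List.map_map]
  apply List.map_congr_left
  intro a _
  simp only [Function.comp]
  ring

theorem pvRunA_eq (char : String) (l : List Char) (d : Int) :
    pvRunA char l d = pvBOf d (pvPos char l) := by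
  induction l generalizing d with
  | nil => simp [pvRunA, pvPos, pvBOf]
  | cons c cs ih =>
    have hz : ∀ (p : Int) (rest : List Int),
        List.zipWith (fun prev cur => cur - prev - 1)
          ((p + 1) :: rest.map (· + 1)) (rest.map (· + 1)) =
        List.zipWith (fun prev cur => cur - prev - 1) (p :: rest) rest := by
      intro p rest
      have := pvZipShift (p :: rest) rest
      simpa using this
    by_cases h : String.ofList [c] = char
    · simp only [pvRunA, pvPos, h, if_true]
      rw [ih]
      cases hp : pvPos char cs with
      | nil => simp [pvBOf]
      | cons p rest =>
        simp only [pvBOf, List.map_cons, List.zipWith_cons_cons]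
        congr 1
        · ring
        congr 1
        · ring
        exact (hz p rest).symm
    · simp only [pvRunA, pvPos, h, if_false]
      rw [ih]
      cases hp : pvPos char cs with
      | nil => simp [pvBOf]
      | cons p rest =>
        simp only [pvBOf, List.map_cons]
        congr 1
        · ring
        exact (hz p rest).symm

theorem pvPos_enumerate (char : String) (l : List Char) (s : Int) :
    (PySem.List.enumerate l s).filterMap
        (fun ic => if String.ofList [ic.2] = char then some ic.1 else none) =
      (pvPos char l).map (· + s) := by
  induction l generalizing s with
  | nil => simp [pvPos, PySem.List.enumerate_nil]
  | cons c cs ih =>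
    by_cases h : String.ofList [c] = char
    · simp only [pvPos, PySem.List.enumerate_cons, List.filterMap_cons, h, if_true,
        ih, List.map_cons]
      rw [pvMapShift]
      congr 1
      ring
    · simp only [pvPos, PySem.List.enumerate_cons, List.filterMap_cons, h, if_false,
        ih]
      rw [pvMapShift]

-- ===== VERDICT (by name: the statement is the Claim_ definition above) =====
theorem findDistYield_spec : Claim_equal_findDistYield := by
  intro string char _
  unfold Spec_findDistYield findDistYield findDistYield_alt
  rw [pvFoldA, pvPos_enumerate, pvRunA_eq]
  simp only [List.nil_append]
  cases pvPos char string.toList with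
  | nil => rfl
  | cons p rest => simp [pvBOf]
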